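-- pv_equiv track=rewrite | github.com/htingwang/HandsOnAlgoDS | LeetCode/1340.Jump-Game-V/Jump-Game-V.py | maxJumps1
-- ===== SOURCE A (Python) =====
-- def maxJumps1(arr, d):
--     n = len(arr)
--     h_idx = []
--     for i, h in enumerate(arr): h_idx.append((h, i))
--     h_idx.sort(reverse = True)
--     dp = [1] * n
--     while h_idx:
--         h, i = h_idx.pop()
--         for ni in range(i - 1, i - d - 1, -1):
--             if 0 <= ni < n:
--                 if arr[ni] >= arr[i]: break
--                 dp[i] = max(dp[i], dp[ni] + 1)
--         for ni in range(i + 1, i + d + 1):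
--             if 0 <= ni < n:
--                 if arr[ni] >= arr[i]: break
--                 dp[i] = max(dp[i], dp[ni] + 1)
--     return max(dp)
-- ===== SOURCE B (Python) =====
-- def maxJumps1(arr, d):
--     # top-down memoized DFS instead of sort-then-bottom-up DP table
--     n = len(arr)
--     memo = {}
--
--     def dfs(i):
--         if i in memo:
--             return memo[i]
--         best = 1
--         j = i - 1
--         while j >= 0 and i - j <= d and arr[j] < arr[i]:
--             best = max(best, dfs(j) + 1)
--             j -= 1
--         j = i + 1
--         while j < n and j - i <= d and arr[j] < arr[i]:
--             best = max(best, dfs(j) + 1)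
--             j += 1
--         memo[i] = best
--         return best
--
--     res = 0
--     for i in range(n):
--         res = max(res, dfs(i))
--     return res
-- ===== Notes on version B (the rewrite author's own statement) =====
-- stated objective: alternative
-- what changed: replaces A's sort-by-height bottom-up DP table (sort descending, pop in ascending order, fill dp[] via bounded scans) with a top-down memoized DFS that needs no sorting and no dp table
import Mathlib
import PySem

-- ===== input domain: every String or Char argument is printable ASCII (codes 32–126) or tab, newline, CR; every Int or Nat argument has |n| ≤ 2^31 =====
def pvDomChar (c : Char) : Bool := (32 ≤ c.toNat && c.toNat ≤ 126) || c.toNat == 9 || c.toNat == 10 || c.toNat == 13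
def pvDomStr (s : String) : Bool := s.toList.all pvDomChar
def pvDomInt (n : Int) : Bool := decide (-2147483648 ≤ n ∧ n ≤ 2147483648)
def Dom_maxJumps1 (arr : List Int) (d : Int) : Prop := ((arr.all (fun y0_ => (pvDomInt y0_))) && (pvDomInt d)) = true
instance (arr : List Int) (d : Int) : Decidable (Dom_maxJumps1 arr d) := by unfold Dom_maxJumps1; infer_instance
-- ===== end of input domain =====

-- B replaces A's sort-by-height bottom-up DP table with a top-down memoized DFS (no sort); equal output everywhere A returns.

-- ===== PORT A =====
-- one inner 'for ni in range(...)' loop of A, with its 'break' (returning dp stops the loop)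
def innerA (arr : List Int) (n i : Int) (rng : List Int) (dp : List Int) : List Int :=
  match rng with
  | [] => dp
  | ni :: rest =>
    if 0 ≤ ni ∧ ni < n then
      if PySem.List.pyGetD arr i 0 ≤ PySem.List.pyGetD arr ni 0 then dp   -- break
      else innerA arr n i rest
        (PySem.List.pySetD dp i (max (PySem.List.pyGetD dp i 0) (PySem.List.pyGetD dp ni 0 + 1)))
    else innerA arr n i rest dp

-- one iteration of A's while loop, for the popped pair (h, i)
def stepA (arr : List Int) (d n : Int) (dp : List Int) (p : Int × Int) : List Int :=
  innerA arr n p.2 (PySem.List.pyRange (p.2 + 1) (p.2 + d + 1) 1)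
    (innerA arr n p.2 (PySem.List.pyRange (p.2 - 1) (p.2 - d - 1) (-1)) dp)

def maxJumps1 (arr : List Int) (d : Int) : Int :=
  let n : Int := PySem.List.len arr
  let h_idx := (PySem.List.enumerate arr).foldl (fun acc p => acc ++ [(p.2, p.1)]) []
  let hs := PySem.List.sorted2 h_idx (fun p => p.1) (fun p => p.2) true
  let dp0 := PySem.List.pyRepeat [(1 : Int)] n
  -- 'while h_idx: h, i = h_idx.pop()' consumes the sorted list back to front
  let dp := hs.reverse.foldl (fun dp p => stepA arr d n dp p) dp0
  (PySem.List.max? dp (fun x => x)).getD 0   -- max(dp); Pre_ excludes arr = [], where Python's max raises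

-- ===== PORT B =====
-- B's inner 'while' scans j outward while in range, within distance d and strictly lower; the visited j
-- (a condition on arr only, not on dfs results) are the takeWhile prefix of the candidate window.
-- fuel only makes the recursion structural; maxJumps1_alt calls it with enough fuel (see cntA_lt_len below).
mutual
def dfsB (arr : List Int) (d n : Int) (fuel : Nat) (memo : PySem.Dict Int Int) (i : Int) :
    PySem.Dict Int Int × Int :=
  match fuel with
  | 0 => (memo, 1)
  | Nat.succ fuel =>
    match PySem.Dict.get? memo i with
    | some v => (memo, v)
    | none =>
      let L := (PySem.List.pyRange (i - 1) (i - d - 1) (-1)).takeWhile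
        (fun j => decide (0 ≤ j ∧ PySem.List.pyGetD arr j 0 < PySem.List.pyGetD arr i 0))
      let R := (PySem.List.pyRange (i + 1) (i + d + 1) 1).takeWhile
        (fun j => decide (j < n ∧ PySem.List.pyGetD arr j 0 < PySem.List.pyGetD arr i 0))
      let r1 := scanB arr d n fuel L memo 1
      let r2 := scanB arr d n fuel R r1.1 r1.2
      (PySem.Dict.insert r2.1 i r2.2, r2.2)
termination_by (fuel, 0)

def scanB (arr : List Int) (d n : Int) (fuel : Nat) (js : List Int) (memo : PySem.Dict Int Int)
    (best : Int) : PySem.Dict Int Int × Int :=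
  match js with
  | [] => (memo, best)
  | j :: rest =>
    let r := dfsB arr d n fuel memo j
    scanB arr d n fuel rest r.1 (max best (r.2 + 1))
termination_by (fuel, js.length + 1)
end

def maxJumps1_alt (arr : List Int) (d : Int) : Int :=
  let n : Int := PySem.List.len arr
  let r := (PySem.List.pyRange 0 n 1).foldl
    (fun acc i =>
      let t := dfsB arr d n arr.length acc.1 i
      (t.1, max acc.2 t.2))
    (PySem.Dict.empty, 0)
  r.2

-- ===== PRECONDITION & SPEC =====
-- Pre_ excludes only arr = [], where Python's max([]) raises ValueError in A.
def Pre_maxJumps1 (arr : List Int) (d : Int) : Prop := arr ≠ []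
instance (arr : List Int) (d : Int) : Decidable (Pre_maxJumps1 arr d) := by
  unfold Pre_maxJumps1; infer_instance
def pvWitness_maxJumps1 : List Int × Int := ([3, 1, 2], 1)

def Spec_maxJumps1 (arr : List Int) (d : Int) (out : Int) : Prop := out = maxJumps1_alt arr d
instance (arr : List Int) (d : Int) (out : Int) : Decidable (Spec_maxJumps1 arr d out) := by
  unfold Spec_maxJumps1; infer_instance

-- ===== CLAIM (what is proved, stated in full; the proofs are below) =====
def Claim_equal_maxJumps1 : Prop := ∀ (arr : List Int) (d : Int), Dom_maxJumps1 arr d → Pre_maxJumps1 arr d → Spec_maxJumps1 arr d (maxJumps1 arr d)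

-- ===== LEMMAS AND PROOFS =====

-- the specification value: Fv arr d i is the jump-chain value that both programs compute at index i
def valA (arr : List Int) (i : Int) : Int := PySem.List.pyGetD arr i 0

def candP (arr : List Int) (n i j : Int) : Bool := decide (0 ≤ j ∧ j < n ∧ valA arr j < valA arr i)

def candL (arr : List Int) (d n i : Int) : List Int :=
  (PySem.List.pyRange (i - 1) (i - d - 1) (-1)).takeWhile (candP arr n i)

def candR (arr : List Int) (d n i : Int) : List Int :=
  (PySem.List.pyRange (i + 1) (i + d + 1) 1).takeWhile (candP arr n i)

def cntA (arr : List Int) (i : Int) : Nat := arr.countP (fun x => decide (x < valA arr i))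

def FJ (arr : List Int) (d : Int) (fuel : Nat) (i : Int) : Int :=
  match fuel with
  | 0 => 1
  | Nat.succ f =>
    (candL arr d arr.length i ++ candR arr d arr.length i).foldl
      (fun b j => max b (FJ arr d f j + 1)) 1

def Fv (arr : List Int) (d : Int) (i : Int) : Int := FJ arr d arr.length i

lemma mem_cand (arr : List Int) (d i j : Int)
    (h : j ∈ candL arr d (arr.length : Int) i ++ candR arr d (arr.length : Int) i) :
    0 ≤ j ∧ j < (arr.length : Int) ∧ valA arr j < valA arr i := by
  rcases List.mem_append.1 h with h | h <;>
    simpa [candP] using List.mem_takeWhile_imp h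

lemma countP_strict_lt {p q : Int → Bool} {l : List Int} {x : Int} (hx : x ∈ l)
    (hq : q x = true) (hp : p x = false) (himp : ∀ y ∈ l, p y = true → q y = true) :
    l.countP p < l.countP q := by
  induction l with
  | nil => cases hx
  | cons a t ih =>
    rw [List.countP_cons, List.countP_cons]
    rcases List.mem_cons.1 hx with rfl | hx'
    · have hle : t.countP p ≤ t.countP q :=
        List.countP_mono_left (fun y hy => himp y (List.mem_cons_of_mem _ hy))
      simp [hp, hq]; omega
    · have h1 := ih hx' (fun y hy => himp y (List.mem_cons_of_mem _ hy))
      have h2 : (if p a = true then 1 else 0) ≤ (if q a = true then 1 else 0) := by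
        by_cases hpa : p a = true
        · simp [hpa, himp a List.mem_cons_self hpa]
        · simp [hpa]
      omega

lemma InRange_of (arr : List Int) {j : Int} (h0 : 0 ≤ j) (h1 : j < (arr.length : Int)) :
    PySem.Raise.InRange arr.length j := by
  simp [PySem.Raise.InRange]; omega

lemma cntA_lt (arr : List Int) {i j : Int} (hj0 : 0 ≤ j) (hjn : j < (arr.length : Int))
    (hv : valA arr j < valA arr i) : cntA arr j < cntA arr i := by
  apply countP_strict_lt (x := valA arr j)
  · exact PySem.List.pyGetD_mem arr 0 (InRange_of arr hj0 hjn)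
  · simpa using hv
  · simp
  · intro y _ hy
    simp at hy ⊢
    exact lt_trans hy hv

lemma cntA_lt_len (arr : List Int) {i : Int} (h0 : 0 ≤ i) (h1 : i < (arr.length : Int)) :
    cntA arr i < arr.length := by
  have hx : valA arr i ∈ arr := PySem.List.pyGetD_mem arr 0 (InRange_of arr h0 h1)
  have h1 := countP_strict_lt (p := fun x => decide (x < valA arr i)) (q := fun _ => true)
    hx rfl (by simp) (fun y _ _ => rfl)
  exact lt_of_lt_of_le h1 List.countP_le_length

lemma FJ_stable (arr : List Int) (d : Int) :
    ∀ (f1 f2 : Nat) (i : Int), cntA arr i < f1 → cntA arr i < f2 →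
      FJ arr d f1 i = FJ arr d f2 i := by
  intro f1
  induction f1 with
  | zero => intro f2 i h1 _; omega
  | succ f1 ih =>
    intro f2 i h1 h2
    cases f2 with
    | zero => omega
    | succ f2 =>
      simp only [FJ]
      apply PySem.List.foldl_congr_mem
      intro acc j hj
      have hm := mem_cand arr d i j hj
      have hcj := cntA_lt arr hm.1 hm.2.1 hm.2.2
      rw [ih f2 j (by omega) (by omega)]

lemma F_rec (arr : List Int) (d : Int) {i : Int} (h0 : 0 ≤ i) (h1 : i < (arr.length : Int)) :
    Fv arr d i = (candL arr d (arr.length : Int) i ++ candR arr d (arr.length : Int) i).foldl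
      (fun b j => max b (Fv arr d j + 1)) 1 := by
  have hlen : 0 < arr.length := by
    have : (0 : Int) < arr.length := lt_of_le_of_lt h0 h1
    exact_mod_cast this
  have hcnt := cntA_lt_len arr h0 h1
  obtain ⟨m, hm⟩ : ∃ m, arr.length = m + 1 := ⟨arr.length - 1, by omega⟩
  unfold Fv
  conv_lhs => rw [hm]
  simp only [FJ]
  apply PySem.List.foldl_congr_mem
  intro acc j hj
  have hmj := mem_cand arr d i j hj
  have hcj := cntA_lt arr hmj.1 hmj.2.1 hmj.2.2
  rw [FJ_stable arr d m arr.length j (by omega) (cntA_lt_len arr hmj.1 hmj.2.1)]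

lemma FJ_ge_one (arr : List Int) (d : Int) (fuel : Nat) (i : Int) : (1 : Int) ≤ FJ arr d fuel i := by
  cases fuel with
  | zero => simp [FJ]
  | succ f =>
    simp only [FJ]
    exact (PySem.List.le_foldl_max_int _ _ _).1

lemma Fv_ge_one (arr : List Int) (d i : Int) : (1 : Int) ≤ Fv arr d i := FJ_ge_one arr d _ i

-- A-side: the inner loops
lemma innerA_out (arr : List Int) (n i : Int) :
    ∀ rng dp, (∀ j ∈ rng, ¬(0 ≤ j ∧ j < n)) → innerA arr n i rng dp = dp := by
  intro rng
  induction rng with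
  | nil => intro dp _; rfl
  | cons j rest ih =>
    intro dp h
    rw [innerA, if_neg (h j List.mem_cons_self)]
    exact ih dp (fun j' hj' => h j' (List.mem_cons_of_mem _ hj'))

lemma pySetD_getD_self (dp : List Int) {i : Int} (h0 : 0 ≤ i) (h1 : i < (dp.length : Int)) :
    PySem.List.pySetD dp i (PySem.List.pyGetD dp i 0) = dp := by
  rw [PySem.List.pySetD_of_nonneg dp _ h0, PySem.List.pyGetD_eq_getElem dp 0 h0 h1]
  exact List.set_getElem_self (by omega)

lemma pyGetD_pySetD_self (dp : List Int) {i : Int} (v : Int) (h0 : 0 ≤ i)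
    (h1 : i < (dp.length : Int)) :
    PySem.List.pyGetD (PySem.List.pySetD dp i v) i 0 = v := by
  rw [PySem.List.pySetD_of_nonneg dp _ h0,
    PySem.List.pyGetD_eq_getElem _ 0 h0 (by rw [List.length_set]; exact h1)]
  exact List.getElem_set_self (by rw [List.length_set]; omega)

lemma pyGetD_pySetD_ne (dp : List Int) {i j : Int} (v : Int) (h0 : 0 ≤ i)
    (hj0 : 0 ≤ j) (hj1 : j < (dp.length : Int)) (hne : j ≠ i) :
    PySem.List.pyGetD (PySem.List.pySetD dp i v) j 0 = PySem.List.pyGetD dp j 0 := by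
  rw [PySem.List.pySetD_of_nonneg dp _ h0,
    PySem.List.pyGetD_eq_getElem _ 0 hj0 (by rw [List.length_set]; exact hj1),
    PySem.List.pyGetD_eq_getElem _ 0 hj0 hj1]
  rw [List.getElem_set_ne (by omega)]

lemma innerA_spec (arr : List Int) (n i : Int) (hn : n = (arr.length : Int)) (hi0 : 0 ≤ i)
    (hi1 : i < n) :
    ∀ rng dp, dp.length = arr.length → (∀ j ∈ rng, j ≠ i) →
      rng.Pairwise (fun j j' => ¬(0 ≤ j ∧ j < n) → ¬(0 ≤ j' ∧ j' < n)) →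
      innerA arr n i rng dp =
        PySem.List.pySetD dp i ((rng.takeWhile (candP arr n i)).foldl
          (fun b j => max b (PySem.List.pyGetD dp j 0 + 1)) (PySem.List.pyGetD dp i 0)) := by
  intro rng
  induction rng with
  | nil =>
    intro dp hlen _ _
    rw [List.takeWhile_nil, List.foldl_nil, innerA]
    exact (pySetD_getD_self dp hi0 (by rw [hlen, ← hn]; exact hi1)).symm
  | cons j rest ih =>
    intro dp hlen hne hpw
    have hji : j ≠ i := hne j List.mem_cons_self
    have hiL : i < (dp.length : Int) := by rw [hlen, ← hn]; exact hi1
    by_cases hinR : 0 ≤ j ∧ j < n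
    · by_cases hge : PySem.List.pyGetD arr i 0 ≤ PySem.List.pyGetD arr j 0
      · rw [innerA, if_pos hinR, if_pos hge]
        have hpj : candP arr n i j = false := by
          simp only [candP, valA, decide_eq_false_iff_not]
          rintro ⟨_, _, hlt⟩; omega
        rw [List.takeWhile_cons_of_neg (by simp [hpj]), List.foldl_nil]
        exact (pySetD_getD_self dp hi0 hiL).symm
      · have hpj : candP arr n i j = true := by
          simp only [candP, valA, decide_eq_true_eq]
          exact ⟨hinR.1, hinR.2, by omega⟩
        rw [innerA, if_pos hinR, if_neg hge]
        set w : Int := max (PySem.List.pyGetD dp i 0) (PySem.List.pyGetD dp j 0 + 1) with hw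
        set dp' := PySem.List.pySetD dp i w with hdp'
        have hlen' : dp'.length = arr.length := by
          rw [hdp', PySem.List.length_pySetD, hlen]
        rw [ih dp' hlen' (fun j' hj' => hne j' (List.mem_cons_of_mem _ hj'))
          (List.pairwise_cons.1 hpw).2]
        have hgi : PySem.List.pyGetD dp' i 0 = w :=
          pyGetD_pySetD_self dp w hi0 hiL
        have hset : ∀ u, PySem.List.pySetD dp' i u = PySem.List.pySetD dp i u := by
          intro u
          rw [hdp', PySem.List.pySetD_of_nonneg dp _ hi0, PySem.List.pySetD_of_nonneg _ _ hi0,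
            PySem.List.pySetD_of_nonneg dp _ hi0, List.set_set]
        rw [hset, hgi, List.takeWhile_cons_of_pos (by simp [hpj]), List.foldl_cons]
        congr 1
        apply PySem.List.foldl_congr_mem
        intro acc j' hj'
        have hpj' := List.mem_takeWhile_imp hj'
        simp only [candP, decide_eq_true_eq] at hpj'
        rw [pyGetD_pySetD_ne dp w hi0 hpj'.1 (by rw [hlen, ← hn]; exact hpj'.2.1) (by
          intro hji'
          subst hji'
          exact absurd hpj'.2.2 (by simp [valA]))]
    · rw [innerA, if_neg hinR]
      have hrest : ∀ j' ∈ rest, ¬(0 ≤ j' ∧ j' < n) :=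
        fun j' hj' => (List.pairwise_cons.1 hpw).1 j' hj' hinR
      rw [innerA_out arr n i rest dp hrest]
      have hpj : candP arr n i j = false := by
        simp only [candP, decide_eq_false_iff_not]
        rintro ⟨a, b, _⟩; exact hinR ⟨a, b⟩
      rw [List.takeWhile_cons_of_neg (by simp [hpj]), List.foldl_nil]
      exact (pySetD_getD_self dp hi0 hiL).symm

lemma pairwise_gt_pyRange_neg_one (a b : Int) :
    (PySem.List.pyRange a b (-1)).Pairwise (fun j j' => j' < j) := by
  rw [PySem.List.pyRange_neg_one_eq_reverse]
  rw [List.pairwise_reverse]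
  exact PySem.List.pairwise_lt_pyRange_one _ _

lemma stepA_spec (arr : List Int) (d : Int) (p : Int × Int) (hi0 : 0 ≤ p.2)
    (hi1 : p.2 < (arr.length : Int)) (dp : List Int) (hlen : dp.length = arr.length)
    (hdpi : PySem.List.pyGetD dp p.2 0 = 1)
    (hc : ∀ j ∈ candL arr d (arr.length : Int) p.2 ++ candR arr d (arr.length : Int) p.2,
      PySem.List.pyGetD dp j 0 = Fv arr d j) :
    stepA arr d (arr.length : Int) dp p = PySem.List.pySetD dp p.2 (Fv arr d p.2) := by
  obtain ⟨ph, i⟩ := p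
  dsimp only at hi0 hi1 hdpi hc ⊢
  -- left loop
  have hpwL : (PySem.List.pyRange (i - 1) (i - d - 1) (-1)).Pairwise
      (fun j j' => ¬(0 ≤ j ∧ j < (arr.length : Int)) → ¬(0 ≤ j' ∧ j' < (arr.length : Int))) := by
    apply List.Pairwise.imp_of_mem (R := fun j j' => j' < j) ?_ (pairwise_gt_pyRange_neg_one _ _)
    intro x y hx hy hlt hnx hny
    have hx' := PySem.List.mem_pyRange_neg_one.1 hx
    have hy' := PySem.List.mem_pyRange_neg_one.1 hy
    exact hnx ⟨by omega, by omega⟩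
  have hneL : ∀ j ∈ PySem.List.pyRange (i - 1) (i - d - 1) (-1), j ≠ i := by
    intro j hj
    have := PySem.List.mem_pyRange_neg_one.1 hj
    omega
  have hL := innerA_spec arr (arr.length : Int) i rfl hi0 hi1
    (PySem.List.pyRange (i - 1) (i - d - 1) (-1)) dp hlen hneL hpwL
  rw [show ((PySem.List.pyRange (i - 1) (i - d - 1) (-1)).takeWhile
    (candP arr (arr.length : Int) i)) = candL arr d (arr.length : Int) i from rfl] at hL
  -- right loop
  have hpwR : (PySem.List.pyRange (i + 1) (i + d + 1) 1).Pairwise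
      (fun j j' => ¬(0 ≤ j ∧ j < (arr.length : Int)) → ¬(0 ≤ j' ∧ j' < (arr.length : Int))) := by
    apply List.Pairwise.imp_of_mem (R := fun j j' => j < j') ?_
      (PySem.List.pairwise_lt_pyRange_one _ _)
    intro x y hx hy hlt hnx hny
    have hx' := PySem.List.mem_pyRange_one.1 hx
    have hy' := PySem.List.mem_pyRange_one.1 hy
    exact hnx ⟨by omega, by omega⟩
  have hneR : ∀ j ∈ PySem.List.pyRange (i + 1) (i + d + 1) 1, j ≠ i := by
    intro j hj
    have := PySem.List.mem_pyRange_one.1 hj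
    omega
  set vL : Int := (candL arr d (arr.length : Int) i).foldl
    (fun b j => max b (PySem.List.pyGetD dp j 0 + 1)) (PySem.List.pyGetD dp i 0) with hvL
  set dp1 := PySem.List.pySetD dp i vL with hdp1
  have hlen1 : dp1.length = arr.length := by rw [hdp1, PySem.List.length_pySetD, hlen]
  have hR := innerA_spec arr (arr.length : Int) i rfl hi0 hi1
    (PySem.List.pyRange (i + 1) (i + d + 1) 1) dp1 hlen1 hneR hpwR
  rw [show ((PySem.List.pyRange (i + 1) (i + d + 1) 1).takeWhile
    (candP arr (arr.length : Int) i)) = candR arr d (arr.length : Int) i from rfl] at hR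
  have hdL : i < (dp.length : Int) := by rw [hlen]; exact hi1
  unfold stepA
  dsimp only
  rw [hL, hR]
  -- reads of dp1 at candR members equal reads of dp; start value is vL
  have hstart : PySem.List.pyGetD dp1 i 0 = vL := pyGetD_pySetD_self dp vL hi0 hdL
  have hreads : (candR arr d (arr.length : Int) i).foldl
      (fun b j => max b (PySem.List.pyGetD dp1 j 0 + 1)) (PySem.List.pyGetD dp1 i 0) =
      (candR arr d (arr.length : Int) i).foldl
        (fun b j => max b (PySem.List.pyGetD dp j 0 + 1)) vL := by
    rw [hstart]
    apply PySem.List.foldl_congr_mem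
    intro acc j hj
    have hpj := List.mem_takeWhile_imp hj
    simp only [candP, decide_eq_true_eq] at hpj
    have hjgt : j ≠ i := by
      have := PySem.List.mem_pyRange_one.1 ((List.takeWhile_sublist _).subset hj)
      omega
    rw [pyGetD_pySetD_ne dp vL hi0 hpj.1 (by rw [hlen]; exact hpj.2.1) hjgt]
  rw [hreads]
  have hsets : ∀ u, PySem.List.pySetD dp1 i u = PySem.List.pySetD dp i u := by
    intro u
    rw [hdp1, PySem.List.pySetD_of_nonneg dp _ hi0, PySem.List.pySetD_of_nonneg _ _ hi0,
      PySem.List.pySetD_of_nonneg dp _ hi0, List.set_set]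
  rw [hsets]
  congr 1
  rw [hvL, hdpi, ← List.foldl_append]
  rw [F_rec arr d hi0 hi1]
  apply PySem.List.foldl_congr_mem
  intro acc j hj
  rw [hc j hj]

lemma loopA (arr : List Int) (d : Int) :
    ∀ (S : List (Int × Int)) (dp : List Int),
      (∀ p ∈ S, p.1 = valA arr p.2 ∧ 0 ≤ p.2 ∧ p.2 < (arr.length : Int)) →
      (S.map Prod.snd).Nodup →
      S.Pairwise (fun p q => p.1 ≤ q.1) →
      dp.length = arr.length →
      (∀ k : Int, 0 ≤ k → k < (arr.length : Int) →
        (k ∈ S.map Prod.snd → PySem.List.pyGetD dp k 0 = 1) ∧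
        (k ∉ S.map Prod.snd → PySem.List.pyGetD dp k 0 = Fv arr d k)) →
      (S.foldl (fun dp p => stepA arr d (arr.length : Int) dp p) dp).length = arr.length ∧
      ∀ k : Int, 0 ≤ k → k < (arr.length : Int) →
        PySem.List.pyGetD (S.foldl (fun dp p => stepA arr d (arr.length : Int) dp p) dp) k 0 =
          Fv arr d k := by
  intro S
  induction S with
  | nil =>
    intro dp _ _ _ hlen hC4
    refine ⟨hlen, fun k hk0 hk1 => ?_⟩
    exact (hC4 k hk0 hk1).2 (by simp)
  | cons p T ih =>
    intro dp hwf hnd hpw hlen hC4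
    obtain ⟨hp1, hp20, hp21⟩ := hwf p List.mem_cons_self
    have hdL : p.2 < (dp.length : Int) := by rw [hlen]; exact hp21
    have hdpi : PySem.List.pyGetD dp p.2 0 = 1 :=
      (hC4 p.2 hp20 hp21).1 (by simp)
    have hnotT : p.2 ∉ T.map Prod.snd := by
      have := hnd
      simp only [List.map_cons, List.nodup_cons] at this
      exact this.1
    have hc : ∀ j ∈ candL arr d (arr.length : Int) p.2 ++ candR arr d (arr.length : Int) p.2,
        PySem.List.pyGetD dp j 0 = Fv arr d j := by
      intro j hj
      obtain ⟨hj0, hj1, hjv⟩ := mem_cand arr d p.2 j hj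
      have hjnot : j ∉ (p :: T).map Prod.snd := by
        simp only [List.map_cons, List.mem_cons]
        rintro (rfl | hjT)
        · omega
        · obtain ⟨q, hq, rfl⟩ := List.mem_map.1 hjT
          have hq1 := (hwf q (List.mem_cons_of_mem _ hq)).1
          have hle : p.1 ≤ q.1 := (List.pairwise_cons.1 hpw).1 q hq
          rw [hp1, hq1] at *
          omega
      exact (hC4 j hj0 hj1).2 hjnot
    rw [List.foldl_cons]
    rw [stepA_spec arr d p hp20 hp21 dp hlen hdpi hc]
    set dp1 := PySem.List.pySetD dp p.2 (Fv arr d p.2) with hdp1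
    have hlen1 : dp1.length = arr.length := by rw [hdp1, PySem.List.length_pySetD, hlen]
    apply ih dp1 (fun q hq => hwf q (List.mem_cons_of_mem _ hq))
      (by simp only [List.map_cons, List.nodup_cons] at hnd; exact hnd.2)
      (List.pairwise_cons.1 hpw).2 hlen1
    intro k hk0 hk1
    constructor
    · intro hkT
      have hkne : k ≠ p.2 := fun h => hnotT (h ▸ hkT)
      rw [hdp1, pyGetD_pySetD_ne dp _ hp20 hk0 (by rw [hlen]; exact hk1) hkne]
      exact (hC4 k hk0 hk1).1 (by simp only [List.map_cons, List.mem_cons]; right; exact hkT)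
    · intro hkT
      by_cases hkp : k = p.2
      · subst hkp
        rw [hdp1, pyGetD_pySetD_self dp _ hp20 hdL]
      · rw [hdp1, pyGetD_pySetD_ne dp _ hp20 hk0 (by rw [hlen]; exact hk1) hkp]
        exact (hC4 k hk0 hk1).2 (by
          simp only [List.map_cons, List.mem_cons]
          rintro (h | h)
          · exact hkp h
          · exact hkT h)

-- the sorted order: descending on first components
lemma insertBy_pairwise_of {α : Type} (R : α → α → Prop) (before : α → α → Bool)
    (htr : ∀ a b c, R a b → R b c → R a c)
    (hbt : ∀ a b, before a b = true → R a b)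
    (hbf : ∀ a b, before a b = false → R b a) :
    ∀ (x : α) (ys : List α), ys.Pairwise R → (PySem.List.insertBy before x ys).Pairwise R := by
  intro x ys
  induction ys with
  | nil => intro _; simp [PySem.List.insertBy]
  | cons y ys ih =>
    intro hp
    have heq : PySem.List.insertBy before x (y :: ys) =
        if before x y then x :: y :: ys else y :: PySem.List.insertBy before x ys := by
      simp [PySem.List.insertBy]
    rw [heq]
    obtain ⟨hy, hys⟩ := List.pairwise_cons.1 hp
    split_ifs with hb
    · refine List.pairwise_cons.2 ⟨?_, hp⟩
      intro z hz
      rcases List.mem_cons.1 hz with rfl | hz'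
      · exact hbt _ _ hb
      · exact htr x y z (hbt _ _ hb) (hy z hz')
    · refine List.pairwise_cons.2 ⟨?_, ih hys⟩
      intro z hz
      rcases (PySem.List.insertBy_mem_iff before x z ys).1 hz with rfl | hz'
      · exact hbf _ _ (by simpa using hb)
      · exact hy z hz'

lemma sorted2_rev_pairwise (xs : List (Int × Int)) :
    (PySem.List.sorted2 xs (fun p => p.1) (fun p => p.2) true).Pairwise
      (fun a b => b.1 ≤ a.1) := by
  have hbody : PySem.List.sorted2 xs (fun p : Int × Int => p.1) (fun p => p.2) true =
      xs.foldl (fun acc x => PySem.List.insertBy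
        (fun a b => decide (b.1 < a.1) || (!decide (a.1 < b.1) && decide (b.2 < a.2))) x acc)
        [] := rfl
  rw [hbody]
  suffices h : ∀ (l : List (Int × Int)) (acc : List (Int × Int)),
      acc.Pairwise (fun a b : Int × Int => b.1 ≤ a.1) →
      (l.foldl (fun acc x => PySem.List.insertBy
        (fun a b => decide (b.1 < a.1) || (!decide (a.1 < b.1) && decide (b.2 < a.2))) x acc)
        acc).Pairwise (fun a b => b.1 ≤ a.1) by
    exact h xs [] List.Pairwise.nil
  intro l
  induction l with
  | nil => intro acc h; exact h
  | cons x t ih =>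
    intro acc h
    rw [List.foldl_cons]
    apply ih
    apply insertBy_pairwise_of (fun a b : Int × Int => b.1 ≤ a.1) _
      (fun a b c h1 h2 => le_trans h2 h1) ?_ ?_ x acc h
    · intro a b hb
      simp only [Bool.or_eq_true, Bool.and_eq_true, Bool.not_eq_true', decide_eq_true_eq,
        decide_eq_false_iff_not] at hb
      rcases hb with hb | ⟨hb, _⟩ <;> omega
    · intro a b hb
      simp only [Bool.or_eq_false_iff, Bool.and_eq_false_iff, Bool.not_eq_false',
        decide_eq_false_iff_not, decide_eq_true_eq] at hb
      omega

-- B-side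
def goodMemo (arr : List Int) (d : Int) (memo : PySem.Dict Int Int) : Prop :=
  ∀ k v, memo.get? k = some v → v = Fv arr d k

lemma takeWhile_congr' {l : List Int} {p q : Int → Bool} (h : ∀ x ∈ l, p x = q x) :
    l.takeWhile p = l.takeWhile q := by
  induction l with
  | nil => rfl
  | cons a t ih =>
    rw [List.takeWhile_cons, List.takeWhile_cons, h a List.mem_cons_self]
    split
    · rw [ih (fun x hx => h x (List.mem_cons_of_mem _ hx))]
    · rfl

lemma L_eq_candL (arr : List Int) (d : Int) {i : Int} (hi1 : i < (arr.length : Int)) :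
    ((PySem.List.pyRange (i - 1) (i - d - 1) (-1)).takeWhile
      (fun j => decide (0 ≤ j ∧ PySem.List.pyGetD arr j 0 < PySem.List.pyGetD arr i 0))) =
    candL arr d (arr.length : Int) i := by
  apply takeWhile_congr'
  intro j hj
  have hm := PySem.List.mem_pyRange_neg_one.1 hj
  simp only [candP, valA, decide_eq_decide]
  constructor
  · rintro ⟨a, b⟩; exact ⟨a, by omega, b⟩
  · rintro ⟨a, _, c⟩; exact ⟨a, c⟩

lemma R_eq_candR (arr : List Int) (d : Int) {i : Int} (hi0 : 0 ≤ i) :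
    ((PySem.List.pyRange (i + 1) (i + d + 1) 1).takeWhile
      (fun j => decide (j < (arr.length : Int) ∧
        PySem.List.pyGetD arr j 0 < PySem.List.pyGetD arr i 0))) =
    candR arr d (arr.length : Int) i := by
  apply takeWhile_congr'
  intro j hj
  have hm := PySem.List.mem_pyRange_one.1 hj
  simp only [candP, valA, decide_eq_decide]
  constructor
  · rintro ⟨a, b⟩; exact ⟨by omega, a, b⟩
  · rintro ⟨_, b, c⟩; exact ⟨b, c⟩

lemma scanB_spec (arr : List Int) (d : Int) (fuel : Nat)
    (hd : ∀ memo i, goodMemo arr d memo → 0 ≤ i → i < (arr.length : Int) → cntA arr i < fuel →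
      goodMemo arr d (dfsB arr d (arr.length : Int) fuel memo i).1 ∧
      (dfsB arr d (arr.length : Int) fuel memo i).2 = Fv arr d i) :
    ∀ js memo best, goodMemo arr d memo →
      (∀ j ∈ js, 0 ≤ j ∧ j < (arr.length : Int) ∧ cntA arr j < fuel) →
      goodMemo arr d (scanB arr d (arr.length : Int) fuel js memo best).1 ∧
      (scanB arr d (arr.length : Int) fuel js memo best).2 =
        js.foldl (fun b j => max b (Fv arr d j + 1)) best := by
  intro js
  induction js with
  | nil => intro memo best hg _; rw [scanB]; exact ⟨hg, rfl⟩
  | cons j rest ih =>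
    intro memo best hg hjs
    obtain ⟨hj0, hj1, hjc⟩ := hjs j List.mem_cons_self
    obtain ⟨hg1, hv1⟩ := hd memo j hg hj0 hj1 hjc
    have hrec := ih (dfsB arr d (arr.length : Int) fuel memo j).1
      (max best ((dfsB arr d (arr.length : Int) fuel memo j).2 + 1)) hg1
      (fun j' hj' => hjs j' (List.mem_cons_of_mem _ hj'))
    rw [scanB]
    refine ⟨hrec.1, ?_⟩
    rw [hrec.2, List.foldl_cons, hv1]

lemma dfsB_spec (arr : List Int) (d : Int) :
    ∀ fuel memo i, goodMemo arr d memo → 0 ≤ i → i < (arr.length : Int) → cntA arr i < fuel →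
      goodMemo arr d (dfsB arr d (arr.length : Int) fuel memo i).1 ∧
      (dfsB arr d (arr.length : Int) fuel memo i).2 = Fv arr d i := by
  intro fuel
  induction fuel with
  | zero => intro memo i _ _ _ h; omega
  | succ f ih =>
    intro memo i hg h0 h1 hc
    rw [dfsB]
    cases hget : PySem.Dict.get? memo i with
    | some v =>
      exact ⟨hg, hg i v hget⟩
    | none =>
      simp only [L_eq_candL arr d h1, R_eq_candR arr d h0]
      have hcands : ∀ j ∈ candL arr d (arr.length : Int) i ++ candR arr d (arr.length : Int) i,
          0 ≤ j ∧ j < (arr.length : Int) ∧ cntA arr j < f := by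
        intro j hj
        obtain ⟨hj0, hj1, hjv⟩ := mem_cand arr d i j hj
        have := cntA_lt arr hj0 hj1 hjv
        exact ⟨hj0, hj1, by omega⟩
      have hs1 := scanB_spec arr d f ih (candL arr d (arr.length : Int) i) memo 1 hg
        (fun j hj => hcands j (List.mem_append.2 (Or.inl hj)))
      have hs2 := scanB_spec arr d f ih (candR arr d (arr.length : Int) i)
        (scanB arr d (arr.length : Int) f (candL arr d (arr.length : Int) i) memo 1).1
        (scanB arr d (arr.length : Int) f (candL arr d (arr.length : Int) i) memo 1).2 hs1.1
        (fun j hj => hcands j (List.mem_append.2 (Or.inr hj)))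
      have hb2 : (scanB arr d (arr.length : Int) f (candR arr d (arr.length : Int) i)
          (scanB arr d (arr.length : Int) f (candL arr d (arr.length : Int) i) memo 1).1
          (scanB arr d (arr.length : Int) f (candL arr d (arr.length : Int) i) memo 1).2).2 =
          Fv arr d i := by
        rw [hs2.2, hs1.2, ← List.foldl_append, ← F_rec arr d h0 h1]
      refine ⟨?_, hb2⟩
      intro k v hkv
      rw [PySem.Dict.get?_insert] at hkv
      split at hkv
      · rename_i hk
        subst hk
        rw [← hb2]; exact (Option.some.inj hkv).symm
      · exact hs2.1 k v hkv

lemma altLoop (arr : List Int) (d : Int) :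
    ∀ (js : List Int) (memo : PySem.Dict Int Int) (b : Int), goodMemo arr d memo →
      (∀ j ∈ js, 0 ≤ j ∧ j < (arr.length : Int)) →
      (js.foldl (fun acc i =>
        let t := dfsB arr d (arr.length : Int) arr.length acc.1 i
        (t.1, max acc.2 t.2)) (memo, b)).2 =
      js.foldl (fun b j => max b (Fv arr d j)) b := by
  intro js
  induction js with
  | nil => intro memo b _ _; rfl
  | cons j rest ih =>
    intro memo b hg hjs
    obtain ⟨hj0, hj1⟩ := hjs j List.mem_cons_self
    obtain ⟨hg', hv⟩ := dfsB_spec arr d arr.length memo j hg hj0 hj1 (cntA_lt_len arr hj0 hj1)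
    have hstep : List.foldl (fun (acc : PySem.Dict Int Int × Int) (i : Int) =>
        let t := dfsB arr d (arr.length : Int) arr.length acc.1 i
        (t.1, max acc.2 t.2)) (memo, b) (j :: rest) =
        List.foldl (fun (acc : PySem.Dict Int Int × Int) (i : Int) =>
          let t := dfsB arr d (arr.length : Int) arr.length acc.1 i
          (t.1, max acc.2 t.2))
          ((dfsB arr d (arr.length : Int) arr.length memo j).1, max b (Fv arr d j)) rest := by
      rw [List.foldl_cons]
      congr 1
      show ((dfsB arr d (arr.length : Int) arr.length memo j).1,
        max b (dfsB arr d (arr.length : Int) arr.length memo j).2) = _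
      rw [hv]
    rw [hstep, List.foldl_cons]
    exact ih _ _ hg' (fun j' hj' => hjs j' (List.mem_cons_of_mem _ hj'))

lemma finalMax (arr : List Int) (d : Int) (dp : List Int) (hne : arr ≠ [])
    (hlen : dp.length = arr.length)
    (hv : ∀ k : Int, 0 ≤ k → k < (arr.length : Int) → PySem.List.pyGetD dp k 0 = Fv arr d k) :
    (PySem.List.max? dp (fun x => x)).getD 0 =
      (PySem.List.pyRange 0 (arr.length : Int) 1).foldl (fun b j => max b (Fv arr d j)) 0 := by
  have hlenpos : 0 < arr.length := by
    cases arr with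
    | nil => exact absurd rfl hne
    | cons a t => simp
  have hmap : dp = (PySem.List.pyRange 0 (arr.length : Int) 1).map (fun j => Fv arr d j) := by
    apply List.ext_getElem
    · rw [List.length_map, PySem.List.length_pyRange_one, hlen]; omega
    · intro k hk1 hk2
      rw [List.getElem_map, PySem.List.getElem_pyRange_one]
      have hk : k < arr.length := by rw [hlen] at hk1; exact hk1
      have hvk := hv (k : Int) (Int.natCast_nonneg k) (by exact_mod_cast hk)
      rw [PySem.List.pyGetD_natCast] at hvk
      rw [List.getD_eq_getElem dp 0 hk1] at hvk
      rw [show ((0 : Int) + (k : Int)) = (k : Int) by ring]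
      exact hvk
  have hrhs : (PySem.List.pyRange 0 (arr.length : Int) 1).foldl
      (fun b j => max b (Fv arr d j)) 0 = dp.foldl max 0 := by
    rw [hmap, List.foldl_map]
  rw [hrhs]
  cases hdp : dp with
  | nil => rw [hdp] at hlen; simp at hlen; omega
  | cons x t =>
    rw [PySem.List.max?_id_cons, Option.getD_some, List.foldl_cons]
    have hx1 : (1 : Int) ≤ x := by
      have hvx := hv 0 le_rfl (by exact_mod_cast hlenpos)
      rw [hdp, PySem.List.pyGetD_zero_cons] at hvx
      rw [hvx]
      exact Fv_ge_one arr d 0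
    rw [max_eq_right (by omega)]

theorem maxJumps1_agree (arr : List Int) (d : Int) (h : arr ≠ []) :
    maxJumps1 arr d = maxJumps1_alt arr d := by
  unfold maxJumps1 maxJumps1_alt
  simp only [PySem.List.len_eq,
    PySem.List.foldl_append_singleton_eq_map (f := fun p : Int × Int => (p.2, p.1)),
    List.nil_append]
  set xs := (PySem.List.enumerate arr 0).map (fun p => (p.2, p.1)) with hxs
  set hs := PySem.List.sorted2 xs (fun p => p.1) (fun p => p.2) true with hhs
  set S := hs.reverse with hS
  have hperm : S.Perm xs := (List.reverse_perm hs).trans (PySem.List.sorted2_perm xs _ _ true)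
  have hmem : ∀ p ∈ S, p.1 = valA arr p.2 ∧ 0 ≤ p.2 ∧ p.2 < (arr.length : Int) := by
    intro p hp
    have hp' : p ∈ xs := hperm.mem_iff.1 hp
    rw [hxs] at hp'
    obtain ⟨q, hq, rfl⟩ := List.mem_map.1 hp'
    obtain ⟨k, hk, rfl⟩ := (PySem.List.mem_enumerate_iff arr 0 q).1 hq
    refine ⟨?_, by omega, by push_cast; omega⟩
    show arr[k] = valA arr (0 + (k : Int))
    rw [zero_add]
    simp only [valA, PySem.List.pyGetD_natCast]
    rw [List.getD_eq_getElem arr 0 hk]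
  have hxs_snd : xs.map Prod.snd = PySem.List.pyRange 0 (arr.length : Int) 1 := by
    rw [hxs, List.map_map]
    have hcomp : (Prod.snd ∘ fun p : Int × Int => (p.2, p.1)) = fun p : Int × Int => p.1 := rfl
    rw [hcomp, PySem.List.map_fst_enumerate, zero_add]
  have hnd : (S.map Prod.snd).Nodup := by
    rw [List.Perm.nodup_iff (hperm.map Prod.snd), hxs_snd]
    exact PySem.List.nodup_pyRange_one 0 _
  have hpwS : S.Pairwise (fun p q : Int × Int => p.1 ≤ q.1) := by
    rw [hS, List.pairwise_reverse]
    exact sorted2_rev_pairwise xs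
  have hdp0 : PySem.List.pyRepeat [(1 : Int)] (arr.length : Int) =
      List.replicate arr.length (1 : Int) := by
    rw [PySem.List.pyRepeat_singleton, Int.toNat_natCast]
  rw [hdp0]
  have hC4 : ∀ k : Int, 0 ≤ k → k < (arr.length : Int) →
      (k ∈ S.map Prod.snd → PySem.List.pyGetD (List.replicate arr.length (1 : Int)) k 0 = 1) ∧
      (k ∉ S.map Prod.snd →
        PySem.List.pyGetD (List.replicate arr.length (1 : Int)) k 0 = Fv arr d k) := by
    intro k hk0 hk1
    have hkmem : k ∈ S.map Prod.snd := by
      rw [(hperm.map Prod.snd).mem_iff, hxs_snd, PySem.List.mem_pyRange_one]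
      exact ⟨hk0, hk1⟩
    refine ⟨fun _ => ?_, fun hk => absurd hkmem hk⟩
    rw [PySem.List.pyGetD_eq_getElem _ 0 hk0 (by rw [List.length_replicate]; exact hk1)]
    exact List.getElem_replicate _
  obtain ⟨hlen', hv'⟩ := loopA arr d S (List.replicate arr.length 1) hmem hnd hpwS
    (List.length_replicate) hC4
  rw [finalMax arr d _ h hlen' hv']
  rw [altLoop arr d (PySem.List.pyRange 0 (arr.length : Int) 1) PySem.Dict.empty 0
    (fun k v hkv => by simp [PySem.Dict.get?_empty] at hkv)
    (fun j hj => by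
      have := PySem.List.mem_pyRange_one.1 hj
      exact ⟨this.1, this.2⟩)]

-- ===== VERDICT (by name: the statement is the Claim_ definition above) =====
theorem maxJumps1_spec : Claim_equal_maxJumps1 := by
  intro arr d _ hpre
  unfold Spec_maxJumps1
  exact maxJumps1_agree arr d hpre
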